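-- pv_equiv track=rewrite | github.com/vshilman/shadowframework20lite | BlenderSFBExporter2/algorithm1.py | compute_patch_edges
-- ===== SOURCE A (Python) =====
-- def compute_patch_edges(faces_verts, all_edges):
--     '''Compute which edges belong to which face'''
--     patches = []
--     for partition in faces_verts:
--         current_edges = []
--         for edge in all_edges:
--             if any((pp in partition) for pp in edge[1:-1]): # Do not check the corners
--                 current_edges.append(edge)
--         patches.append(current_edges)
--     return patches
-- ===== SOURCE B (Python) =====
-- def compute_patch_edges(faces_verts, all_edges):
--     '''Compute which edges belong to which face'''
--     vert_parts = {}
--     for i, partition in enumerate(faces_verts):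
--         for v in partition:
--             vert_parts.setdefault(v, set()).add(i)
--     patches = [[] for _ in faces_verts]
--     for edge in all_edges:
--         idxs = set()
--         for pp in edge[1:-1]:
--             idxs |= vert_parts.get(pp, set())
--         for i in sorted(idxs):
--             patches[i].append(edge)
--     return patches
-- ===== Notes on version B (the rewrite author's own statement) =====
-- stated objective: faster
-- what changed: Replaces A's nested partition-by-partition scan (each edge's inner vertices tested against each partition by list membership) with a vertex-to-partition-indices dictionary built once over faces_verts, then a single pass over all_edges that appends each edge to every patch whose index appears in the union of its inner vertices' index sets.
import Mathlib
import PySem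

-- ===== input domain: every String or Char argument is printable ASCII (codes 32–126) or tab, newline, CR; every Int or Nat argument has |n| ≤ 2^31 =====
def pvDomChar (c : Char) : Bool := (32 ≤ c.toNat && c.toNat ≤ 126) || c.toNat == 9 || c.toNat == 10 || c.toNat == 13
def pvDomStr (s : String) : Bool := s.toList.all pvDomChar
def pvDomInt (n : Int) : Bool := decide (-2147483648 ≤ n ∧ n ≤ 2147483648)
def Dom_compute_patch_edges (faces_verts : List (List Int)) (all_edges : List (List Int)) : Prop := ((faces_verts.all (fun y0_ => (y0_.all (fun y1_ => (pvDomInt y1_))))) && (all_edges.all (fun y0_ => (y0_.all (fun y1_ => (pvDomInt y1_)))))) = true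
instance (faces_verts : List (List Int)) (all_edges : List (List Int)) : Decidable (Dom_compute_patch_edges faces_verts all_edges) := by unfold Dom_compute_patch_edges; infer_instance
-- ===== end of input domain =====

-- B replaces A's partition×edge nested membership scans by a vertex→partition-indices dict built
-- once, then a single pass over the edges (faster: the inner per-partition membership scan disappears).


-- ===== PORT A =====
-- literal port of A: for each partition, scan all edges and keep those whose
-- inner vertices edge[1:-1] meet the partition
def compute_patch_edges (faces_verts : List (List Int)) (all_edges : List (List Int)) : List (List (List Int)) :=
  faces_verts.foldl (fun patches partition =>
    patches ++ [all_edges.foldl (fun current_edges edge =>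
      if (PySem.List.slice edge (some 1) (some (-1))).any (fun pp => partition.contains pp)
      then current_edges ++ [edge] else current_edges) []]) []

-- ===== PORT B =====
-- vert_parts: vertex → set of partition indices containing it
def cpeVertParts (faces_verts : List (List Int)) : PySem.Dict Int (List Int) :=
  (PySem.List.enumerate faces_verts 0).foldl (fun d p =>
    p.2.foldl (fun d v => d.modify v [] (fun s => PySem.Set.add s p.1)) d) PySem.Dict.empty

def compute_patch_edges_alt (faces_verts : List (List Int)) (all_edges : List (List Int)) : List (List (List Int)) :=
  let vert_parts := cpeVertParts faces_verts
  all_edges.foldl (fun patches edge =>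
    let idxs : PySem.Set Int :=
      (PySem.List.slice edge (some 1) (some (-1))).foldl
        (fun s pp => PySem.Set.union s (vert_parts.getD pp [])) PySem.Set.empty
    (PySem.List.sorted idxs (fun x => x) false).foldl
      (fun ps i => ps.modify i.toNat (fun p => p ++ [edge])) patches)
    (faces_verts.map (fun _ => []))

-- ===== PRECONDITION & SPEC =====
def Spec_compute_patch_edges (faces_verts : List (List Int)) (all_edges : List (List Int)) (out : List (List (List Int))) : Prop := out = compute_patch_edges_alt faces_verts all_edges
instance (faces_verts : List (List Int)) (all_edges : List (List Int)) (out : List (List (List Int))) : Decidable (Spec_compute_patch_edges faces_verts all_edges out) := by unfold Spec_compute_patch_edges; infer_instance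

-- ===== CLAIM (what is proved, stated in full; the proofs are below) =====
def Claim_equal_compute_patch_edges : Prop := ∀ (faces_verts : List (List Int)) (all_edges : List (List Int)), Dom_compute_patch_edges faces_verts all_edges → Spec_compute_patch_edges faces_verts all_edges (compute_patch_edges faces_verts all_edges)

-- ===== LEMMAS AND PROOFS =====

-- membership in the dict after adding one partition's vertices
theorem cpe_mem_addPart (part : List Int) (d : PySem.Dict Int (List Int)) (i x v : Int) :
    x ∈ (part.foldl (fun d v => d.modify v [] (fun s => PySem.Set.add s i)) d).getD v []
      ↔ x ∈ d.getD v [] ∨ (x = i ∧ v ∈ part) := by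
  induction part generalizing d with
  | nil => simp
  | cons a t ih =>
    simp only [List.foldl_cons, ih, PySem.Dict.getD_modify, List.mem_cons]
    by_cases hva : v = a
    · subst hva
      simp [PySem.Set.mem_add]
      tauto
    · simp only [if_neg hva]
      tauto

-- membership in the finished dict
theorem cpe_mem_vertParts (faces_verts : List (List Int)) (x v : Int) :
    x ∈ (cpeVertParts faces_verts).getD v []
      ↔ ∃ k : Nat, ∃ _ : k < faces_verts.length, x = (k : Int) ∧ v ∈ faces_verts[k] := by
  unfold cpeVertParts
  have main : ∀ (l : List (Int × List Int)) (d : PySem.Dict Int (List Int)),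
      x ∈ (l.foldl (fun d p => p.2.foldl (fun d v => d.modify v [] (fun s => PySem.Set.add s p.1)) d) d).getD v []
        ↔ x ∈ d.getD v [] ∨ ∃ p ∈ l, x = p.1 ∧ v ∈ p.2 := by
    intro l
    induction l with
    | nil => simp
    | cons q t ih =>
      intro d
      simp only [List.foldl_cons, ih, cpe_mem_addPart, List.mem_cons]
      constructor
      · rintro ((h | h) | ⟨p, hp, h⟩)
        · exact Or.inl h
        · exact Or.inr ⟨q, Or.inl rfl, h⟩
        · exact Or.inr ⟨p, Or.inr hp, h⟩
      · rintro (h | ⟨p, (rfl | hp), h⟩)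
        · exact Or.inl (Or.inl h)
        · exact Or.inl (Or.inr h)
        · exact Or.inr ⟨p, hp, h⟩
  rw [main]
  simp only [PySem.Dict.getD_empty, List.not_mem_nil, false_or]
  constructor
  · rintro ⟨p, hp, hx, hv⟩
    rw [PySem.List.mem_enumerate_iff] at hp
    obtain ⟨k, hk, rfl⟩ := hp
    exact ⟨k, hk, by simpa using hx, hv⟩
  · rintro ⟨k, hk, hx, hv⟩
    exact ⟨((k : Int), faces_verts[k]), by rw [PySem.List.mem_enumerate_iff]; exact ⟨k, hk, by simp⟩, hx, hv⟩

-- the per-edge index set: membership and distinctness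
theorem cpe_mem_idxs (vp : PySem.Dict Int (List Int)) (inner : List Int) (s : PySem.Set Int)
    (hs : s.Nodup) (x : Int) :
    x ∈ inner.foldl (fun s pp => PySem.Set.union s (vp.getD pp [])) s
      ↔ x ∈ s ∨ ∃ pp ∈ inner, x ∈ vp.getD pp [] := by
  induction inner generalizing s with
  | nil => simp
  | cons a t ih =>
    simp only [List.foldl_cons, ih _ (PySem.Set.nodup_union _ _ hs), PySem.Set.mem_union,
      List.mem_cons]
    constructor
    · rintro ((h | h) | ⟨pp, hpp, h⟩)
      · exact Or.inl h
      · exact Or.inr ⟨a, Or.inl rfl, h⟩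
      · exact Or.inr ⟨pp, Or.inr hpp, h⟩
    · rintro (h | ⟨pp, (rfl | hpp), h⟩)
      · exact Or.inl (Or.inl h)
      · exact Or.inl (Or.inr h)
      · exact Or.inr ⟨pp, hpp, h⟩

theorem cpe_nodup_idxs (vp : PySem.Dict Int (List Int)) (inner : List Int) (s : PySem.Set Int)
    (hs : s.Nodup) :
    (inner.foldl (fun s pp => PySem.Set.union s (vp.getD pp [])) s).Nodup := by
  induction inner generalizing s with
  | nil => exact hs
  | cons a t ih => exact ih _ (PySem.Set.nodup_union _ _ hs)

-- fold of modifies over a Nodup list of nonnegative indices, seen elementwise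
theorem cpe_foldl_modify (L : List Int) (hnd : L.Nodup) (hnn : ∀ x ∈ L, 0 ≤ x)
    (f : List (List Int) → List (List Int)) (S : List (List (List Int))) (j : Nat) :
    (L.foldl (fun ps i => ps.modify i.toNat f) S)[j]?
      = if (j : Int) ∈ L then S[j]?.map f else S[j]? := by
  induction L generalizing S with
  | nil => simp
  | cons a t ih =>
    have ha : 0 ≤ a := hnn a (List.mem_cons_self ..)
    have hmod : (S.modify a.toNat f)[j]? = if a.toNat = j then S[j]?.map f else S[j]? := by
      rw [List.getElem?_modify]
      by_cases h : a.toNat = j <;> simp [h, Option.map]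
    rw [List.foldl_cons, ih (List.Nodup.of_cons hnd) (fun x hx => hnn x (List.mem_cons_of_mem _ hx))]
    by_cases hjt : (j : Int) ∈ t
    · have hja : ¬ a.toNat = j := by
        rintro rfl
        rw [Int.toNat_of_nonneg ha] at hjt
        exact (List.nodup_cons.mp hnd).1 hjt
      rw [if_pos hjt, hmod, if_neg hja, if_pos (List.mem_cons_of_mem a hjt)]
    · by_cases hja : (j : Int) = a
      · have hta : a.toNat = j := by omega
        rw [if_neg hjt, hmod, if_pos hta, if_pos (List.mem_cons.mpr (Or.inl hja))]
      · have hta : ¬ a.toNat = j := by omega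
        rw [if_neg hjt, hmod, if_neg hta, if_neg (by simp [hja, hjt])]

-- the B-side condition coincides with A's membership test
theorem cpe_cond_eq (faces_verts : List (List Int)) (edge : List Int) (j : Nat)
    (hj : j < faces_verts.length) :
    ((j : Int) ∈ (PySem.List.slice edge (some 1) (some (-1))).foldl
        (fun s pp => PySem.Set.union s ((cpeVertParts faces_verts).getD pp []))
        PySem.Set.empty)
      ↔ ((PySem.List.slice edge (some 1) (some (-1))).any
            (fun pp => faces_verts[j].contains pp) = true) := by
  rw [cpe_mem_idxs _ _ PySem.Set.empty List.nodup_nil]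
  simp only [PySem.Set.empty, List.not_mem_nil, false_or, List.any_eq_true, List.contains_iff_mem]
  constructor
  · rintro ⟨pp, hpp, h⟩
    rw [cpe_mem_vertParts] at h
    obtain ⟨k, hk, hjk, hv⟩ := h
    have : j = k := by omega
    subst this
    exact ⟨pp, hpp, by simpa using hv⟩
  · rintro ⟨pp, hpp, h⟩
    refine ⟨pp, hpp, ?_⟩
    rw [cpe_mem_vertParts]
    exact ⟨j, hj, rfl, by simpa using h⟩

-- the edge loop, seen elementwise
theorem cpe_foldB (faces_verts : List (List Int)) (E : List (List Int))
    (S : List (List (List Int))) (j : Nat) :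
    (E.foldl (fun patches edge =>
      (PySem.List.sorted
          ((PySem.List.slice edge (some 1) (some (-1))).foldl
            (fun s pp => PySem.Set.union s ((cpeVertParts faces_verts).getD pp []))
            PySem.Set.empty) (fun x => x) false).foldl
        (fun ps i => ps.modify i.toNat (fun p => p ++ [edge])) patches) S)[j]?
      = S[j]?.map (fun p => p ++ E.filter (fun edge =>
          decide ((j : Int) ∈ (PySem.List.slice edge (some 1) (some (-1))).foldl
            (fun s pp => PySem.Set.union s ((cpeVertParts faces_verts).getD pp []))
            PySem.Set.empty))) := by
  induction E generalizing S with
  | nil =>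
    cases h : S[j]? <;> simp [h]
  | cons e E' ih =>
    set idxs := (PySem.List.slice e (some 1) (some (-1))).foldl
      (fun s pp => PySem.Set.union s ((cpeVertParts faces_verts).getD pp []))
      PySem.Set.empty with hidxs
    have hnd : (PySem.List.sorted idxs (fun x => x) false).Nodup :=
      ((PySem.List.sorted_perm idxs (fun x => x) false).nodup_iff).mpr
        (cpe_nodup_idxs _ _ PySem.Set.empty List.nodup_nil)
    have hnn : ∀ x ∈ PySem.List.sorted idxs (fun x => x) false, 0 ≤ x := by
      intro x hx
      rw [PySem.List.mem_sorted] at hx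
      rw [hidxs, cpe_mem_idxs _ _ PySem.Set.empty List.nodup_nil] at hx
      rcases hx with h | ⟨pp, _, h⟩
      · simp [PySem.Set.empty] at h
      · rw [cpe_mem_vertParts] at h
        obtain ⟨k, _, rfl, _⟩ := h
        exact Int.natCast_nonneg k
    rw [List.foldl_cons, ih, cpe_foldl_modify _ hnd hnn, List.filter_cons]
    simp only [PySem.List.mem_sorted]
    by_cases hc : (j : Int) ∈ idxs
    · rw [if_pos hc, decide_eq_true hc]
      cases S[j]? <;> simp
    · rw [if_neg hc, decide_eq_false hc]
      cases S[j]? <;> simp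

-- A as a map of filters
theorem cpe_A_eq (faces_verts : List (List Int)) (all_edges : List (List Int)) :
    compute_patch_edges faces_verts all_edges
      = faces_verts.map (fun partition => all_edges.filter (fun edge =>
          (PySem.List.slice edge (some 1) (some (-1))).any (fun pp => partition.contains pp))) := by
  unfold compute_patch_edges
  rw [PySem.List.foldl_append_singleton_eq_map]
  simp only [List.nil_append]
  congr 1
  funext partition
  rw [PySem.List.foldl_append_if_eq_filter]
  simp

-- ===== VERDICT (by name: the statement is the Claim_ definition above) =====
theorem compute_patch_edges_spec : Claim_equal_compute_patch_edges := by
  intro faces_verts all_edges _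
  unfold Spec_compute_patch_edges
  rw [cpe_A_eq]
  apply List.ext_getElem?
  intro j
  unfold compute_patch_edges_alt
  rw [cpe_foldB]
  by_cases hj : j < faces_verts.length
  · rw [List.getElem?_map, List.getElem?_map]
    rw [List.getElem?_eq_getElem hj]
    simp only [Option.map_some]
    simp only [List.nil_append, Option.some.injEq]
    apply List.filter_congr
    intro edge _
    rw [decide_eq_decide.mpr (cpe_cond_eq faces_verts edge j hj), Bool.decide_eq_true]
  · have h1 : faces_verts[j]? = none := List.getElem?_eq_none (by omega)
    rw [List.getElem?_map, List.getElem?_map, h1]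
    simp
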